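-- pv_equiv track=rewrite | github.com/Infrapink/calconv | old_byzantine.py | nyd
-- ===== SOURCE A (Python) =====
-- epoch = -290861
--
-- cycle4 = (4 * 365) + 1
--
-- def year_length(year):
--     '''Returns number of days in a year'''
--     year = int(year)
--
--     if (year % 4) == 0:
--         ans = 366
--     else:
--         ans = 365
--
--     return ans
--
-- def nyd(year):
--     '''Compute the Julian Day on which New Year's Day falls for a given year'''
--     year = int(year)
--
--     cycles = year // 4
--     y = 4 * cycles
--     ans = epoch + (cycles * cycle4)
--     while (y + 4 <= year):
--         ans += cycle4
--         y += 4
--     while (y < year):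
--         ans += year_length(y)
--         y += 1
--
--     return ans
-- ===== SOURCE B (Python) =====
-- epoch = -290861
--
-- def nyd(year):
--     '''Compute the Julian Day on which New Year's Day falls for a given year'''
--     year = int(year)
--     return epoch + 365 * year + (year + 3) // 4
-- ===== Notes on version B (the rewrite author's own statement) =====
-- stated objective: simpler
-- what changed: Replaced the cycle counting and the two while loops (one of which never executes) with a single closed-form arithmetic expression that counts leap days by floor division.
import Mathlib
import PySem

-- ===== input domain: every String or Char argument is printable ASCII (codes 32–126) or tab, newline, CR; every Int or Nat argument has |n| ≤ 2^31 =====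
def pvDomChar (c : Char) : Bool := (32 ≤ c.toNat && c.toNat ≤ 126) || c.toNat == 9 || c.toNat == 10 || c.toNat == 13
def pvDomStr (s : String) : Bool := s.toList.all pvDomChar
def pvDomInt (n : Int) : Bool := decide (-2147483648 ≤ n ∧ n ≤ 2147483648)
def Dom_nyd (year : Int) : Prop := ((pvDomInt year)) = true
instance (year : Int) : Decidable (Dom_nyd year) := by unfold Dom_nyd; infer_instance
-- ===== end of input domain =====

-- B replaces A's cycle bookkeeping and while loops by one closed-form expression (simpler).

-- ===== PORT A =====
def pvEpoch : Int := -290861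

def pvCycle4 : Int := (4 * 365) + 1

def year_length (year : Int) : Int :=
  if PySem.Int.mod year 4 = 0 then 366 else 365

-- first while loop: while (y + 4 <= year): ans += cycle4; y += 4
def nydLoop1 (year y ans : Int) : Int × Int :=
  if _h : y + 4 ≤ year then nydLoop1 year (y + 4) (ans + pvCycle4) else (y, ans)
termination_by (year - y).toNat
decreasing_by omega

-- second while loop: while (y < year): ans += year_length(y); y += 1
def nydLoop2 (year y ans : Int) : Int :=
  if _h : y < year then nydLoop2 year (y + 1) (ans + year_length y) else ans
termination_by (year - y).toNat
decreasing_by omega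

def nyd (year : Int) : Int :=
  let cycles := PySem.Int.floordiv year 4
  let y := 4 * cycles
  let ans := pvEpoch + cycles * pvCycle4
  let p := nydLoop1 year y ans
  nydLoop2 year p.1 p.2

-- ===== PORT B =====
def nyd_alt (year : Int) : Int :=
  pvEpoch + 365 * year + PySem.Int.floordiv (year + 3) 4

-- ===== PRECONDITION & SPEC =====
def Spec_nyd (year : Int) (out : Int) : Prop := out = nyd_alt year
instance (year : Int) (out : Int) : Decidable (Spec_nyd year out) := by unfold Spec_nyd; infer_instance

-- ===== CLAIM (what is proved, stated in full; the proofs are below) =====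
def Claim_equal_nyd : Prop := ∀ (year : Int), Dom_nyd year → Spec_nyd year (nyd year)

-- ===== LEMMAS AND PROOFS =====

theorem nydLoop1_stop (year y ans : Int) (h : ¬ y + 4 ≤ year) :
    nydLoop1 year y ans = (y, ans) := by
  rw [nydLoop1]; simp [h]

theorem nydLoop2_step (year y ans : Int) (h : y < year) :
    nydLoop2 year y ans = nydLoop2 year (y + 1) (ans + year_length y) := by
  rw [nydLoop2]; simp [h]

theorem nydLoop2_stop (year y ans : Int) (h : ¬ y < year) :
    nydLoop2 year y ans = ans := by
  rw [nydLoop2]; simp [h]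

theorem year_length_eq (y : Int) :
    year_length y = if y % 4 = 0 then 366 else 365 := by
  unfold year_length
  rw [PySem.Int.mod_eq_emod_of_pos (by omega : (0:Int) < 4)]

-- ===== VERDICT (by name: the statement is the Claim_ definition above) =====
theorem nyd_spec : Claim_equal_nyd := by
  intro year _
  unfold Spec_nyd nyd nyd_alt
  rw [PySem.Int.floordiv_eq_ediv_of_pos (by omega : (0:Int) < 4),
      PySem.Int.floordiv_eq_ediv_of_pos (by omega : (0:Int) < 4)]
  set q := year / 4 with hq
  have hmod : year = 4 * q + year % 4 := by omega
  have hr : year % 4 = 0 ∨ year % 4 = 1 ∨ year % 4 = 2 ∨ year % 4 = 3 := by omega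
  have hstop : ¬ 4 * q + 4 ≤ year := by omega
  show nydLoop2 year (nydLoop1 year (4 * q) (pvEpoch + q * pvCycle4)).1
        (nydLoop1 year (4 * q) (pvEpoch + q * pvCycle4)).2 =
      pvEpoch + 365 * year + (year + 3) / 4
  rw [nydLoop1_stop year (4 * q) _ hstop]
  have hq3 : (year + 3) / 4 = if year % 4 = 0 then q else q + 1 := by
    split_ifs with h <;> omega
  rcases hr with h | h | h | h
  · rw [nydLoop2_stop _ _ _ (by omega)]
    simp [pvEpoch, pvCycle4, hq3, h]; omega
  · rw [nydLoop2_step _ _ _ (by omega), nydLoop2_stop _ _ _ (by omega)]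
    rw [year_length_eq]
    have : (4 * q) % 4 = 0 := by omega
    simp [pvEpoch, pvCycle4, hq3, h, this]; omega
  · rw [nydLoop2_step _ _ _ (by omega), nydLoop2_step _ _ _ (by omega),
        nydLoop2_stop _ _ _ (by omega)]
    rw [year_length_eq, year_length_eq]
    have h0 : (4 * q) % 4 = 0 := by omega
    have h1 : (4 * q + 1) % 4 = 1 := by omega
    simp [pvEpoch, pvCycle4, hq3, h, h0, h1]; omega
  · rw [nydLoop2_step _ _ _ (by omega), nydLoop2_step _ _ _ (by omega),
        nydLoop2_step _ _ _ (by omega), nydLoop2_stop _ _ _ (by omega)]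
    rw [year_length_eq, year_length_eq, year_length_eq]
    have h0 : (4 * q) % 4 = 0 := by omega
    have h1 : (4 * q + 1) % 4 = 1 := by omega
    have h2 : (4 * q + 2) % 4 = 2 := by omega
    simp [pvEpoch, pvCycle4, hq3, h, h0, h1, h2]; omega
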